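-- pv_equiv track=rewrite | github.com/Katelyn-Bell/Agent_Sheriff | backend/src/agentsheriff/skills/laws.py | _make_rule_id
-- ===== SOURCE A (Python) =====
-- from typing import Any, Protocol
--
-- def _coerce_str(value: Any) -> str | None:
--     if value is None:
--         return None
--     text = str(value).strip()
--     return text or None
--
-- def _make_rule_id(skill_id: str, raw: dict[str, Any], index: int, seen: set[str]) -> str:
--     raw_id = _coerce_str(raw.get("id")) or _coerce_str(raw.get("name")) or f"rule-{index + 1}"
--     candidate = f"law.{_slug(skill_id)}.{_slug(raw_id)}"
--     if candidate not in seen: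
--         return candidate
--     suffix = 2
--     while f"{candidate}.{suffix}" in seen:
--         suffix += 1
--     return f"{candidate}.{suffix}"
--
-- def _slug(value: str) -> str:
--     cleaned = "".join(char.lower() if char.isalnum() else "_" for char in value)
--     while "__" in cleaned:
--         cleaned = cleaned.replace("__", "_")
--     return cleaned.strip("_") or "rule"
-- ===== SOURCE B (Python) =====
-- # B: single-pass slug (emit-with-flag instead of build-then-collapse), key-loop base
-- # selection, and a single candidate-testing loop instead of check + while.
-- from typing import Any
--
--
-- def _slug_once(value: str) -> str:
--     out = []
--     prev_us = True  # swallow any leading non-alnum run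
--     for ch in value:
--         if ch.isalnum():
--             out.append(ch.lower())
--             prev_us = False
--         elif not prev_us:
--             out.append("_")
--             prev_us = True
--     if out and out[-1] == "_":
--         out.pop()
--     return "".join(out) or "rule"
--
--
-- def _make_rule_id(skill_id: str, raw: dict, index: int, seen: set) -> str:
--     base = None
--     for key in ("id", "name"):
--         value = raw.get(key)
--         if value is not None:
--             text = str(value).strip()
--             if text:
--                 base = text
--                 break
--     if base is None:
--         base = "rule-%d" % (index + 1)
--     candidate = "law.%s.%s" % (_slug_once(skill_id), _slug_once(base))
--     rule_id = candidate
--     suffix = 2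
--     while rule_id in seen:
--         rule_id = "%s.%d" % (candidate, suffix)
--         suffix += 1
--     return rule_id
-- ===== Notes on version B (the rewrite author's own statement) =====
-- stated objective: simpler
-- what changed: The slug is built in one left-to-right pass with a last-was-underscore flag (never emitting a leading or doubled underscore, then dropping at most one trailing one) instead of mapping every non-alnum char to '_' and repeatedly running replace('__','_') to a fixpoint; the base id comes from a loop over the keys ('id','name') instead of an or-chain of coercions, and the candidate check plus suffix search is one while loop over rule_id instead of a membership test followed by a separate suffix loop.
import Mathlib
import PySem

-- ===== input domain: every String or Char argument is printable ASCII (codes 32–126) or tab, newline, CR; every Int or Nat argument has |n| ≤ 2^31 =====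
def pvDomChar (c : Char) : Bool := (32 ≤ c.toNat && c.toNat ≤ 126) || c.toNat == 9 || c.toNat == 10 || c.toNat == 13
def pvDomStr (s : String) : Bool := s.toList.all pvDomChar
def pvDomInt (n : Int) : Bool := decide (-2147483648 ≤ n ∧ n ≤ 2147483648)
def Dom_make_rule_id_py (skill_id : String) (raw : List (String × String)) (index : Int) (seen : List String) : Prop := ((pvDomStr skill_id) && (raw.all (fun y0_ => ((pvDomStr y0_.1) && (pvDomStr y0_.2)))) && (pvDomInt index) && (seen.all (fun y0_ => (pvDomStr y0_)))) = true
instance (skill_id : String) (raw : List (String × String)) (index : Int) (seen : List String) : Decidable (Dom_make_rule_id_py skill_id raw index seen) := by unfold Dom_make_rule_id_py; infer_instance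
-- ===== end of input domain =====

-- B re-implements the slug as one pass with a last-was-underscore flag (instead of
-- build-then-collapse '__' until fixpoint), picks the base by a loop over the keys
-- ("id", "name"), and folds candidate check + suffix search into one loop; same results.

-- ===== PORT A =====
-- Reference forms of `s.replace("__", "_")` and `"__" in s`, needed by the port's
-- termination argument (`pvReplace_length_lt`, cited in decreasing_by).
def pvReplUU : List Char → List Char
  | [] => []
  | [c] => [c]
  | c :: d :: t => if c = '_' ∧ d = '_' then '_' :: pvReplUU t else c :: pvReplUU (d :: t)

def pvHasUU : List Char → Bool
  | [] => false
  | [_] => false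
  | c :: d :: t => (decide (c = '_') && decide (d = '_')) || pvHasUU (d :: t)

theorem pvReplUU_length_le (l : List Char) : (pvReplUU l).length ≤ l.length := by
  fun_induction pvReplUU l <;> simp_all <;> omega

theorem pvReplUU_length_lt (l : List Char) (h : pvHasUU l = true) :
    (pvReplUU l).length < l.length := by
  fun_induction pvReplUU l with
  | case1 => simp [pvHasUU] at h
  | case2 => simp [pvHasUU] at h
  | case3 c d t hcd ih =>
      have := pvReplUU_length_le t
      simp
      omega
  | case4 c d t hcd ih =>
      simp only [pvHasUU, Bool.or_eq_true, Bool.and_eq_true, decide_eq_true_eq] at h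
      have ht : pvHasUU (d :: t) = true := by
        rcases h with h | h
        · exact absurd h hcd
        · exact h
      have := ih ht
      simp only [List.length_cons] at this ⊢
      omega

theorem pvGo_UU (fuel : Nat) : ∀ (l acc : List Char), l.length ≤ fuel →
    PySem.Chars.replace.go ['_', '_'] ['_'] fuel l acc = acc.reverse ++ pvReplUU l := by
  induction fuel with
  | zero =>
      intro l acc h
      have : l = [] := List.length_eq_zero_iff.mp (Nat.le_zero.mp h)
      subst this
      simp [PySem.Chars.replace.go, pvReplUU]
  | succ n ih =>
      intro l acc h
      match l with
      | [] => simp [PySem.Chars.replace.go, pvReplUU]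
      | c :: t =>
          rw [PySem.Chars.replace.go]
          by_cases hp : ['_', '_'].isPrefixOf (c :: t) = true
          · have hpre := List.isPrefixOf_iff_prefix.mp hp
            obtain ⟨hc, h2⟩ := List.cons_prefix_cons.mp hpre
            subst hc
            match t, h2 with
            | d :: t2, h2 =>
                obtain ⟨hd, -⟩ := List.cons_prefix_cons.mp h2
                subst hd
                simp only [hp, if_true]
                rw [show List.drop ['_', '_'].length ('_' :: '_' :: t2) = t2 from rfl,
                  show (['_'] : List Char).reverse ++ acc = '_' :: acc from rfl]
                rw [ih t2 ('_' :: acc) (by simp at h ⊢; omega)]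
                simp [pvReplUU]
          · simp only [hp, if_false, Bool.false_eq_true]
            rw [ih t (c :: acc) (by simp at h ⊢; omega)]
            match t with
            | [] => simp [pvReplUU]
            | d :: t2 =>
                have hcd : ¬(c = '_' ∧ d = '_') := by
                  rintro ⟨rfl, rfl⟩
                  simp [List.isPrefixOf] at hp
                simp [pvReplUU, hcd]

theorem pvReplace_eq_replUU (l : List Char) :
    PySem.Chars.replace l ['_', '_'] ['_'] = pvReplUU l := by
  rw [PySem.Chars.replace]
  rw [if_neg (by decide)]
  exact (pvGo_UU l.length l [] (le_refl _)).trans (by simp)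

theorem pvIsIn_iff_hasUU (l : List Char) :
    PySem.Chars.isIn ['_', '_'] l = pvHasUU l := by
  have key : ∀ (x : List Char), (['_', '_'] <:+: x) ↔ pvHasUU x = true := by
    intro x
    induction x with
    | nil => simp [pvHasUU]
    | cons c t ih =>
        rw [List.infix_cons_iff]
        match t with
        | [] =>
            simp only [pvHasUU]
            constructor
            · rintro (hpre | hinf)
              · have := hpre.length_le; simp at this
              · simp at hinf
            · intro h; simp at h
        | d :: t2 =>
            simp only [pvHasUU, Bool.or_eq_true, Bool.and_eq_true, decide_eq_true_eq]
            rw [← ih]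
            constructor
            · rintro (hpre | hinf)
              · obtain ⟨hc, h2⟩ := List.cons_prefix_cons.mp hpre
                obtain ⟨hd, -⟩ := List.cons_prefix_cons.mp h2
                exact Or.inl ⟨hc.symm, hd.symm⟩
              · exact Or.inr hinf
            · rintro (⟨rfl, rfl⟩ | hinf)
              · exact Or.inl (by simp)
              · exact Or.inr hinf
  by_cases h : pvHasUU l = true
  · rw [h]
    have := (key l).mpr h
    rw [← PySem.Chars.isIn_iff_infix] at this
    exact this
  · rw [Bool.not_eq_true] at h
    rw [h]
    rw [PySem.Chars.isIn_eq_false_iff]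
    rw [key l, h]
    simp

theorem pvReplace_length_lt (l : List Char) (h : PySem.Chars.isIn ['_', '_'] l = true) :
    (PySem.Chars.replace l ['_', '_'] ['_']).length < l.length := by
  rw [pvReplace_eq_replUU]
  exact pvReplUU_length_lt l (by rw [← pvIsIn_iff_hasUU]; exact h)

-- while "__" in cleaned: cleaned = cleaned.replace("__", "_")
def pvA_collapse (l : List Char) : List Char :=
  if h : PySem.Chars.isIn ['_', '_'] l = true then
    pvA_collapse (PySem.Chars.replace l ['_', '_'] ['_'])
  else l
termination_by l.length
decreasing_by exact pvReplace_length_lt l h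

def pvA_slug (value : String) : String :=
  let cleaned := pvA_collapse (value.toList.map
    (fun c => if PySem.Chars.isalnum c then PySem.Chars.lowerChar c else '_'))
  let stripped := PySem.Chars.stripChars cleaned ['_']
  if stripped.isEmpty then "rule" else String.ofList stripped

def pvA_coerce : Option String → Option String
  | none => none
  | some s =>
      let t := PySem.Str.strip s
      if t = "" then none else some t

-- while f"{candidate}.{suffix}" in seen: suffix += 1   (fuel seen.length: each true
-- test consumes a distinct member of seen other than candidate, so it never runs out)
def pvA_suffix (candidate : String) (seen : List String) : Nat → Int → String
  | 0, suffix => candidate ++ "." ++ PySem.Int.toStr suffix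
  | fuel + 1, suffix =>
      if seen.contains (candidate ++ "." ++ PySem.Int.toStr suffix) then
        pvA_suffix candidate seen fuel (suffix + 1)
      else candidate ++ "." ++ PySem.Int.toStr suffix

def make_rule_id_py (skill_id : String) (raw : List (String × String)) (index : Int) (seen : List String) : String :=
  let raw_id :=
    match pvA_coerce (PySem.Dict.get? (PySem.Dict.ofList raw) "id") with
    | some t => t
    | none =>
      match pvA_coerce (PySem.Dict.get? (PySem.Dict.ofList raw) "name") with
      | some t => t
      | none => "rule-" ++ PySem.Int.toStr (index + 1)
  let candidate := "law." ++ pvA_slug skill_id ++ "." ++ pvA_slug raw_id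
  if ¬ seen.contains candidate then candidate
  else pvA_suffix candidate seen seen.length 2

-- ===== PORT B =====
-- one pass: emit ch.lower() for alnum, a single '_' per non-alnum run (never leading)
def pvB_go : Bool → List Char → List Char
  | _, [] => []
  | prevUs, c :: t =>
      if PySem.Chars.isalnum c then PySem.Chars.lowerChar c :: pvB_go false t
      else if prevUs then pvB_go true t
      else '_' :: pvB_go true t

def pvB_slug (value : String) : String :=
  let out := pvB_go true value.toList
  let out := if out.getLast? = some '_' then out.dropLast else out
  if out.isEmpty then "rule" else String.ofList out

def pvB_base (d : PySem.Dict String String) : List String → Option String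
  | [] => none
  | k :: ks =>
      match PySem.Dict.get? d k with
      | none => pvB_base d ks
      | some v =>
          let t := PySem.Str.strip v
          if t = "" then pvB_base d ks else some t

-- rule_id = candidate; while rule_id in seen: rule_id = f"{candidate}.{suffix}"; suffix += 1
-- (fuel seen.length + 1: every true test consumes a distinct member of seen)
def pvB_loop (candidate : String) (seen : List String) : Nat → String → Int → String
  | 0, rule_id, _ => rule_id
  | fuel + 1, rule_id, suffix =>
      if seen.contains rule_id then
        pvB_loop candidate seen fuel (candidate ++ "." ++ PySem.Int.toStr suffix) (suffix + 1)
      else rule_id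

def make_rule_id_py_alt (skill_id : String) (raw : List (String × String)) (index : Int) (seen : List String) : String :=
  let base := (pvB_base (PySem.Dict.ofList raw) ["id", "name"]).getD ("rule-" ++ PySem.Int.toStr (index + 1))
  let candidate := "law." ++ pvB_slug skill_id ++ "." ++ pvB_slug base
  pvB_loop candidate seen (seen.length + 1) candidate 2

-- ===== PRECONDITION & SPEC =====
def Spec_make_rule_id_py (skill_id : String) (raw : List (String × String)) (index : Int) (seen : List String) (out : String) : Prop := out = make_rule_id_py_alt skill_id raw index seen
instance (skill_id : String) (raw : List (String × String)) (index : Int) (seen : List String) (out : String) : Decidable (Spec_make_rule_id_py skill_id raw index seen out) := by unfold Spec_make_rule_id_py; infer_instance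

-- ===== CLAIM (what is proved, stated in full; the proofs are below) =====
def Claim_equal_make_rule_id_py : Prop := ∀ (skill_id : String) (raw : List (String × String)) (index : Int) (seen : List String), Dom_make_rule_id_py skill_id raw index seen → Spec_make_rule_id_py skill_id raw index seen (make_rule_id_py skill_id raw index seen)

-- ===== LEMMAS AND PROOFS =====

-- squeeze: collapse every run of '_' to a single '_' (the common value of both slugs)
def pvSq : List Char → List Char
  | [] => []
  | [c] => [c]
  | c :: d :: t => if c = '_' ∧ d = '_' then pvSq (d :: t) else c :: pvSq (d :: t)

theorem pvSq_replUU_cons (x : List Char) (c : Char) :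
    pvSq (c :: pvReplUU x) = pvSq (c :: x) := by
  match x with
  | [] => rfl
  | [d] => rfl
  | d :: e :: t =>
      by_cases hde : d = '_' ∧ e = '_'
      · obtain ⟨rfl, rfl⟩ := hde
        rw [show pvReplUU ('_' :: '_' :: t) = '_' :: pvReplUU t from by simp [pvReplUU]]
        by_cases hc : c = '_'
        · subst hc
          show pvSq ('_' :: '_' :: pvReplUU t) = pvSq ('_' :: '_' :: '_' :: t)
          rw [show pvSq ('_' :: '_' :: pvReplUU t) = pvSq ('_' :: pvReplUU t) by
                simp [pvSq]]
          rw [pvSq_replUU_cons t '_']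
          simp [pvSq]
        · show pvSq (c :: '_' :: pvReplUU t) = pvSq (c :: '_' :: '_' :: t)
          rw [show pvSq (c :: '_' :: pvReplUU t) = c :: pvSq ('_' :: pvReplUU t) by
                simp [pvSq, hc]]
          rw [pvSq_replUU_cons t '_']
          simp [pvSq, hc]
      · simp only [pvReplUU, if_neg hde]
        show pvSq (c :: d :: pvReplUU (e :: t)) = pvSq (c :: d :: e :: t)
        by_cases hcd : c = '_' ∧ d = '_'
        · rw [show pvSq (c :: d :: pvReplUU (e :: t)) = pvSq (d :: pvReplUU (e :: t)) by
                simp [pvSq, hcd]]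
          rw [pvSq_replUU_cons (e :: t) d]
          simp [pvSq, hcd]
        · rw [show pvSq (c :: d :: pvReplUU (e :: t)) = c :: pvSq (d :: pvReplUU (e :: t)) by
                simp [pvSq, hcd]]
          rw [pvSq_replUU_cons (e :: t) d]
          simp [pvSq, hcd]
termination_by x.length

theorem pvSq_replUU (x : List Char) : pvSq (pvReplUU x) = pvSq x := by
  match x with
  | [] => rfl
  | [d] => rfl
  | d :: e :: t =>
      by_cases hde : d = '_' ∧ e = '_'
      · obtain ⟨rfl, rfl⟩ := hde
        rw [show pvReplUU ('_' :: '_' :: t) = '_' :: pvReplUU t from by simp [pvReplUU]]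
        rw [pvSq_replUU_cons t '_']
        simp [pvSq]
      · simp only [pvReplUU, if_neg hde]
        rw [pvSq_replUU_cons (e :: t) d]

theorem pvSq_of_not_hasUU (x : List Char) (h : pvHasUU x = false) : pvSq x = x := by
  fun_induction pvSq x with
  | case1 => rfl
  | case2 => rfl
  | case3 c d t hcd ih =>
      exfalso
      simp only [pvHasUU, Bool.or_eq_false_iff, Bool.and_eq_false_iff] at h
      rcases h with ⟨h1, -⟩
      rcases hcd with ⟨rfl, rfl⟩
      simp at h1
  | case4 c d t hcd ih =>
      simp only [pvHasUU, Bool.or_eq_false_iff] at h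
      rw [ih h.2]

theorem pvA_collapse_eq_sq (x : List Char) : pvA_collapse x = pvSq x := by
  rw [pvA_collapse]
  by_cases h : PySem.Chars.isIn ['_', '_'] x = true
  · rw [dif_pos h]
    have hlt := pvReplace_length_lt x h
    rw [pvA_collapse_eq_sq (PySem.Chars.replace x ['_', '_'] ['_'])]
    rw [pvReplace_eq_replUU, pvSq_replUU]
  · rw [dif_neg h]
    rw [pvSq_of_not_hasUU]
    rw [← pvIsIn_iff_hasUU]
    exact Bool.not_eq_true _ |>.mp h
termination_by x.length
decreasing_by exact pvReplace_length_lt x h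

theorem pvLower_ne_underscore (c : Char) (h : PySem.Chars.isalnum c = true) :
    PySem.Chars.lowerChar c ≠ '_' := by
  rw [PySem.Chars.lowerChar]
  by_cases hu : PySem.Chars.isupper c = true
  · rw [if_pos hu]
    have hb : 65 ≤ c.toNat ∧ c.toNat ≤ 90 := by
      simp [PySem.Chars.isupper, Char.le_def, UInt32.le_iff_toNat_le] at hu
      exact hu
    intro heq
    have hv : (c.toNat + 32).isValidChar := by
      left; omega
    have := congrArg Char.toNat heq
    rw [show (Char.ofNat (c.toNat + 32)).toNat = c.toNat + 32 by
          simp only [Char.ofNat, Char.toNat]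
          rw [dif_pos (show (c.val.toNat + 32).isValidChar from hv)]
          simp only [Char.ofNatAux]
          simp
          omega] at this
    have h95 : c.toNat + 32 = 95 := by simpa using this
    omega
  · rw [if_neg hu]
    intro heq
    subst heq
    simp [PySem.Chars.isalnum, PySem.Chars.isalpha, PySem.Chars.isdigit,
      PySem.Chars.isupper, PySem.Chars.islower] at h

theorem pvB_go_head (l : List Char) : (pvB_go true l).head? ≠ some '_' := by
  induction l with
  | nil => simp [pvB_go]
  | cons c t ih =>
      rw [pvB_go]
      by_cases ha : PySem.Chars.isalnum c = true
      · rw [if_pos ha]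
        simp only [List.head?_cons, ne_eq, Option.some.injEq]
        exact pvLower_ne_underscore c ha
      · rw [if_neg ha, if_pos rfl]
        exact ih

theorem pvSq_cons_ne (c : Char) (hc : c ≠ '_') (y : List Char) :
    pvSq (c :: y) = c :: pvSq y := by
  match y with
  | [] => rfl
  | d :: t => simp [pvSq, hc]

theorem pvSq_cons_ne' (c : Char) (y : List Char) (hy : y.head? ≠ some '_') :
    pvSq (c :: y) = c :: pvSq y := by
  match y with
  | [] => rfl
  | d :: t =>
      have hd : d ≠ '_' := by simpa using hy
      simp [pvSq, hd]

theorem pvSq_uu (t : List Char) : pvSq ('_' :: '_' :: t) = pvSq ('_' :: t) := by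
  simp [pvSq]

theorem pvB_go_alnum (b : Bool) (c : Char) (t : List Char) (ha : PySem.Chars.isalnum c = true) :
    pvB_go b (c :: t) = PySem.Chars.lowerChar c :: pvB_go false t := by
  cases b <;> rw [pvB_go, if_pos ha]

theorem pvB_go_nal_true (c : Char) (t : List Char) (ha : ¬ PySem.Chars.isalnum c = true) :
    pvB_go true (c :: t) = pvB_go true t := by
  rw [pvB_go, if_neg ha]; rfl

theorem pvB_go_nal_false (c : Char) (t : List Char) (ha : ¬ PySem.Chars.isalnum c = true) :
    pvB_go false (c :: t) = '_' :: pvB_go true t := by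
  rw [pvB_go, if_neg ha]; rfl

theorem pvB_go_eq_sq (l : List Char) :
    pvB_go false l
        = pvSq (l.map (fun c => if PySem.Chars.isalnum c then PySem.Chars.lowerChar c else '_'))
      ∧ '_' :: pvB_go true l
        = pvSq ('_' :: l.map (fun c => if PySem.Chars.isalnum c then PySem.Chars.lowerChar c else '_')) := by
  induction l with
  | nil => constructor <;> rfl
  | cons c t ih =>
      obtain ⟨ih1, ih2⟩ := ih
      rw [List.map_cons]
      by_cases ha : PySem.Chars.isalnum c = true
      · have hne := pvLower_ne_underscore c ha
        rw [if_pos ha]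
        constructor
        · rw [pvB_go_alnum false c t ha, pvSq_cons_ne _ hne, ih1]
        · rw [pvB_go_alnum true c t ha,
            pvSq_cons_ne' '_' _ (by simp only [List.head?_cons]; simpa using hne),
            pvSq_cons_ne _ hne, ih1]
      · rw [if_neg ha]
        constructor
        · rw [pvB_go_nal_false c t ha, ih2]
        · rw [pvB_go_nal_true c t ha, pvSq_uu, ih2]

theorem pvB_go_false_cases (l : List Char) :
    pvB_go false l = pvB_go true l ∨ pvB_go false l = '_' :: pvB_go true l := by
  match l with
  | [] => left; rfl
  | c :: t =>
      by_cases ha : PySem.Chars.isalnum c = true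
      · left
        rw [pvB_go_alnum false c t ha, pvB_go_alnum true c t ha]
      · right
        rw [pvB_go_nal_false c t ha, pvB_go_nal_true c t ha]

theorem pvB_go_noUU (b : Bool) (l : List Char) : pvHasUU (pvB_go b l) = false := by
  induction l generalizing b with
  | nil => cases b <;> rfl
  | cons c t ih =>
      have key : ∀ (z : List Char), z.head? ≠ some '_' → pvHasUU z = false →
          pvHasUU ('_' :: z) = false := by
        intro z h1 h2
        match z with
        | [] => rfl
        | d :: t2 =>
            simp only [pvHasUU, Bool.or_eq_false_iff]
            refine ⟨?_, h2⟩
            simp only [List.head?_cons, ne_eq, Option.some.injEq] at h1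
            simp [h1]
      by_cases ha : PySem.Chars.isalnum c = true
      · rw [pvB_go_alnum b c t ha]
        have hne := pvLower_ne_underscore c ha
        match hgo : pvB_go false t with
        | [] => rfl
        | d :: t2 =>
            have h2 : pvHasUU (d :: t2) = false := by rw [← hgo]; exact ih false
            simp [pvHasUU, hne, h2]
      · cases b with
        | true => rw [pvB_go_nal_true c t ha]; exact ih true
        | false =>
            rw [pvB_go_nal_false c t ha]
            exact key (pvB_go true t) (pvB_go_head t) (ih true)

theorem pvDropWhile_go (l : List Char) :
    List.dropWhile (fun c => (['_'] : List Char).contains c) (pvB_go false l) = pvB_go true l := by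
  have hdrop : ∀ (z : List Char), z.head? ≠ some '_' →
      List.dropWhile (fun c => (['_'] : List Char).contains c) z = z := by
    intro z h1
    match z with
    | [] => rfl
    | d :: t2 =>
        simp only [List.head?_cons, ne_eq, Option.some.injEq] at h1
        rw [List.dropWhile_cons_of_neg]
        simp [h1]
  rcases pvB_go_false_cases l with h | h
  · rw [h]
    exact hdrop _ (pvB_go_head l)
  · rw [h]
    rw [List.dropWhile_cons_of_pos (by simp)]
    exact hdrop _ (pvB_go_head l)

theorem pvStripRight_eq_post (z : List Char) (h : pvHasUU z = false) :
    (List.dropWhile (fun c => (['_'] : List Char).contains c) z.reverse).reverse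
      = (if z.getLast? = some '_' then z.dropLast else z) := by
  match z with
  | [] => rfl
  | [c] =>
      by_cases hc : c = '_'
      · subst hc; rfl
      · rw [if_neg (by simpa using hc)]
        rw [show ([c] : List Char).reverse = [c] from rfl,
          List.dropWhile_cons_of_neg (by simp [hc])]
        rfl
  | c :: d :: t =>
      have hUU : ¬(c = '_' ∧ d = '_') := by
        rintro ⟨rfl, rfl⟩
        simp [pvHasUU] at h
      have ht : pvHasUU (d :: t) = false := by
        simp only [pvHasUU, Bool.or_eq_false_iff] at h
        exact h.2
      have ih := pvStripRight_eq_post (d :: t) ht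
      have hpost : (if (c :: d :: t : List Char).getLast? = some '_'
            then (c :: d :: t : List Char).dropLast else (c :: d :: t : List Char))
          = c :: (if (d :: t : List Char).getLast? = some '_'
            then (d :: t : List Char).dropLast else (d :: t : List Char)) := by
        rw [List.getLast?_cons_cons]
        by_cases hl : (d :: t : List Char).getLast? = some '_'
        · rw [if_pos hl, if_pos hl]; rfl
        · rw [if_neg hl, if_neg hl]
      rw [hpost, ← ih]
      rw [List.reverse_cons, List.dropWhile_append]
      by_cases hall : (List.dropWhile (fun c => (['_'] : List Char).contains c) (d :: t).reverse).isEmpty = true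
      · -- every char of d :: t is '_': with no '__' this forces d = '_', t = [] — and then c ≠ '_'
        rw [List.isEmpty_iff, List.dropWhile_eq_nil_iff] at hall
        have hd : d = '_' := by have := hall d (by simp); simpa using this
        have htnil : t = [] := by
          match t with
          | [] => rfl
          | e :: t2 =>
              exfalso
              have he : e = '_' := by have := hall e (by simp); simpa using this
              have : pvHasUU (d :: e :: t2) = true := by simp [pvHasUU, hd, he]
              rw [this] at ht
              exact Bool.true_eq_false.mp ht
        subst hd htnil
        have hc : c ≠ '_' := fun hc => hUU ⟨hc, rfl⟩
        rw [if_pos (by simp)]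
        rw [List.dropWhile_cons_of_neg (by simp [hc])]
        simp
      · rw [if_neg hall]
        rw [List.reverse_append]
        simp
termination_by z.length

theorem pvSlug_eq (s : String) : pvA_slug s = pvB_slug s := by
  rw [pvA_slug, pvB_slug]
  have h1 := (pvB_go_eq_sq s.toList).1
  simp only [PySem.Chars.stripChars]
  rw [pvA_collapse_eq_sq, ← h1]
  rw [pvDropWhile_go s.toList]
  rw [pvStripRight_eq_post (pvB_go true s.toList) (pvB_go_noUU true s.toList)]

theorem pvBase_eq (dd : PySem.Dict String String) (d : String) :
    (match pvA_coerce (PySem.Dict.get? dd "id") with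
      | some t => t
      | none =>
        match pvA_coerce (PySem.Dict.get? dd "name") with
        | some t => t
        | none => d)
      = (pvB_base dd ["id", "name"]).getD d := by
  have hname : (match pvA_coerce (PySem.Dict.get? dd "name") with
        | some t => t
        | none => d)
      = (pvB_base dd ["name"]).getD d := by
    cases hy : PySem.Dict.get? dd "name" with
    | none => simp [pvB_base, hy, pvA_coerce]
    | some v =>
        by_cases hv : PySem.Str.strip v = "" <;>
          simp [pvB_base, hy, pvA_coerce, hv]
  cases hx : PySem.Dict.get? dd "id" with
  | none =>
      rw [show pvA_coerce none = none from rfl]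
      rw [show pvB_base dd ["id", "name"] = pvB_base dd ["name"] by rw [pvB_base, hx]]
      exact hname
  | some v =>
      by_cases hv : PySem.Str.strip v = ""
      · rw [show pvA_coerce (some v) = none by rw [pvA_coerce]; simp [hv]]
        rw [show pvB_base dd ["id", "name"] = pvB_base dd ["name"] by
              rw [pvB_base, hx]; simp [hv]]
        exact hname
      · rw [show pvA_coerce (some v) = some (PySem.Str.strip v) by rw [pvA_coerce]; simp [hv]]
        rw [show pvB_base dd ["id", "name"] = some (PySem.Str.strip v) by
              rw [pvB_base, hx]; simp [hv]]
        rfl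

theorem pvLoop_eq (candidate : String) (seen : List String) (g : Nat) : ∀ (s : Int),
    pvA_suffix candidate seen g s
      = pvB_loop candidate seen g (candidate ++ "." ++ PySem.Int.toStr s) (s + 1) := by
  induction g with
  | zero => intro s; rfl
  | succ n ih =>
      intro s
      rw [pvA_suffix, pvB_loop]
      by_cases h : seen.contains (candidate ++ "." ++ PySem.Int.toStr s) = true
      · rw [if_pos h, if_pos h]
        exact ih (s + 1)
      · rw [if_neg h, if_neg h]

-- ===== VERDICT (by name: the statement is the Claim_ definition above) =====
theorem make_rule_id_py_spec : Claim_equal_make_rule_id_py := by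
  intro skill_id raw index seen _
  unfold Spec_make_rule_id_py make_rule_id_py make_rule_id_py_alt
  simp only [pvBase_eq (PySem.Dict.ofList raw) ("rule-" ++ PySem.Int.toStr (index + 1)),
    pvSlug_eq]
  set cand := "law." ++ pvB_slug skill_id ++ "." ++ pvB_slug
    ((pvB_base (PySem.Dict.ofList raw) ["id", "name"]).getD ("rule-" ++ PySem.Int.toStr (index + 1))) with hcand
  show (if ¬ seen.contains cand = true then cand else pvA_suffix cand seen seen.length 2)
      = pvB_loop cand seen (seen.length + 1) cand 2
  rw [pvB_loop]
  by_cases h : seen.contains cand = true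
  · rw [if_neg (fun hn => hn h), if_pos h]
    exact pvLoop_eq cand seen seen.length 2
  · rw [if_pos h, if_neg h]
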